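-- pv_equiv track=rewrite | github.com/JemPak/PyProjects | ArbolEnDiccionario.py | Sub_dividir_moviles
-- ===== SOURCE A (Python) =====
-- def Sub_dividir_moviles(lista_mapeada: list[list]) -> list[list[list]]:
--     """Entra una lista de listas completa de los datos mapeados en foma de lista entera,
--          Ej: [[0 2 5 4] [1 2 3 4] [3 8 1 5]]
--         la funcion me retorna una lista de lista de listas que contienen los submoviles de cada movil.
--         salida del Ejemplo: [ [ [0 2 5 4][1 2 3 4] ] , [[3 8 1 5]] ]
--     Parameters:
--         lista_mapeada: list
--             lista de lista completa con los datos convertidoa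
--     Return:
--         lista_final: list[list[list]]
--             lista de lista de listas con los submoviles que conforman cada movil
--   """
--     lista_final = [[]]
--     espera = 1
--     index = 0
--     for movil in lista_mapeada:
--         lista_final[index].append(movil)
--         espera += movil.count(0) - 1
--         if espera == 0:
--             lista_final.append([])
--             index += 1
--             espera = 1
--     lista_final.pop()
--     return lista_final
-- ===== SOURCE B (Python) =====
-- def Sub_dividir_moviles(lista_mapeada: list[list]) -> list[list[list]]:
--     """Two-pass rewrite: first find group end indices from the running sum of
--     (zero_count - 1) hitting successive thresholds -1, -2, ...; then slice the
--     original list between consecutive boundaries (the unclosed tail is dropped)."""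
--     ends = []
--     c = 0
--     t = -1
--     for i, movil in enumerate(lista_mapeada):
--         c += movil.count(0) - 1
--         if c == t:
--             ends.append(i + 1)
--             t -= 1
--     res = []
--     prev = 0
--     for e in ends:
--         res.append(lista_mapeada[prev:e])
--         prev = e
--     return res
-- ===== Notes on version B (the rewrite author's own statement) =====
-- stated objective: alternative
-- what changed: Replaces A's single stateful loop (mutating the last slot of a growing list-of-lists, appending fresh groups and a final pop) by two passes: one pass computing group end indices from the running sum of (zero_count - 1) hitting thresholds -1, -2, ..., then a slicing pass cutting the original list between consecutive boundaries.
import Mathlib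
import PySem

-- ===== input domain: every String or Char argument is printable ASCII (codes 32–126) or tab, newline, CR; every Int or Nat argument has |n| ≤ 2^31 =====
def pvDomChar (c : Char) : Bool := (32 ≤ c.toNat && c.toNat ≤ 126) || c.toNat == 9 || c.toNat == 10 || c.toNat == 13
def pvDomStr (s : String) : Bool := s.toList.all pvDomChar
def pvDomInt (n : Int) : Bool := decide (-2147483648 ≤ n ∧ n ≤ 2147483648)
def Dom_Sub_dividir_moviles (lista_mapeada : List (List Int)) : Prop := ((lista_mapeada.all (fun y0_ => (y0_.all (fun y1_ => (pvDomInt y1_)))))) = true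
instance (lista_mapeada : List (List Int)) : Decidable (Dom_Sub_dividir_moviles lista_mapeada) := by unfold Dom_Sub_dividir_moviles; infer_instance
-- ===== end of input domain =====

-- ===== PORT A =====
-- A's for-loop: state (lista_final, espera, index); lista_final[index].append(movil)
-- is List.modify at index; final .pop() of the last element is dropLast.
def loopA_Sub_dividir_moviles : List (List Int) → List (List (List Int)) → Int → Nat → List (List (List Int))
  | [], lf, _, _ => lf
  | movil :: rest, lf, espera, index =>
      let lf' := lf.modify index (fun g => g ++ [movil])
      let espera' := espera + PySem.List.count movil 0 - 1
      if espera' = 0 then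
        loopA_Sub_dividir_moviles rest (lf' ++ [[]]) 1 (index + 1)
      else
        loopA_Sub_dividir_moviles rest lf' espera' index

def Sub_dividir_moviles (lista_mapeada : List (List Int)) : List (List (List Int)) :=
  (loopA_Sub_dividir_moviles lista_mapeada [[]] 1 0).dropLast

-- ===== PORT B =====
-- B pass 1: end indices where the running sum of (count(0) - 1) hits the next threshold.
def endsLoop_Sub_dividir_moviles : List (List Int) → Nat → Int → Int → List Nat
  | [], _, _, _ => []
  | movil :: rest, i, c, t =>
      let c' := c + PySem.List.count movil 0 - 1
      if c' = t then (i + 1) :: endsLoop_Sub_dividir_moviles rest (i + 1) c' (t - 1)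
      else endsLoop_Sub_dividir_moviles rest (i + 1) c' t

-- B pass 2: slice the original list between consecutive boundaries.
def slicesLoop_Sub_dividir_moviles (full : List (List Int)) : List Nat → Nat → List (List (List Int))
  | [], _ => []
  | e :: rest, prev =>
      PySem.List.slice full (some (prev : Int)) (some (e : Int)) ::
        slicesLoop_Sub_dividir_moviles full rest e

def Sub_dividir_moviles_alt (lista_mapeada : List (List Int)) : List (List (List Int)) :=
  slicesLoop_Sub_dividir_moviles lista_mapeada
    (endsLoop_Sub_dividir_moviles lista_mapeada 0 0 (-1)) 0

-- ===== PRECONDITION & SPEC =====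
def Spec_Sub_dividir_moviles (lista_mapeada : List (List Int)) (out : List (List (List Int))) : Prop := out = Sub_dividir_moviles_alt lista_mapeada
instance (lista_mapeada : List (List Int)) (out : List (List (List Int))) : Decidable (Spec_Sub_dividir_moviles lista_mapeada out) := by unfold Spec_Sub_dividir_moviles; infer_instance

-- ===== CLAIM (what is proved, stated in full; the proofs are below) =====
def Claim_equal_Sub_dividir_moviles : Prop := ∀ (lista_mapeada : List (List Int)), Dom_Sub_dividir_moviles lista_mapeada → Spec_Sub_dividir_moviles lista_mapeada (Sub_dividir_moviles lista_mapeada)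

-- ===== LEMMAS AND PROOFS =====

-- ===== VERDICT (by name: the statement is the Claim_ definition above) =====
-- Common reference recursion: pvGroups rest espera cur = the remaining closed groups,
-- given current wait value `espera` and the currently open group `cur`.
def pvGroups : List (List Int) → Int → List (List Int) → List (List (List Int))
  | [], _, _ => []
  | movil :: rest, espera, cur =>
      if espera + PySem.List.count movil 0 - 1 = 0 then
        (cur ++ [movil]) :: pvGroups rest 1 []
      else pvGroups rest (espera + PySem.List.count movil 0 - 1) (cur ++ [movil])

theorem pvModify_append (closed : List (List (List Int))) (cur : List (List Int))
    (movil : List Int) :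
    (closed ++ [cur]).modify closed.length (fun g => g ++ [movil])
      = closed ++ [cur ++ [movil]] := by
  induction closed with
  | nil => simp [List.modify]
  | cons h t ih => simpa [List.modify] using ih

theorem pvLoopA_eq_groups (rest : List (List Int)) :
    ∀ (closed : List (List (List Int))) (cur : List (List Int)) (espera : Int),
    (loopA_Sub_dividir_moviles rest (closed ++ [cur]) espera closed.length).dropLast
      = closed ++ pvGroups rest espera cur := by
  induction rest with
  | nil => intro closed cur espera; simp [loopA_Sub_dividir_moviles, pvGroups]
  | cons movil rest ih =>
      intro closed cur espera
      simp only [loopA_Sub_dividir_moviles, pvModify_append, pvGroups]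
      by_cases h : espera + (PySem.List.count movil 0 : Int) - 1 = 0
      · simp only [h, if_true]
        rw [show closed ++ [cur ++ [movil]] ++ [([] : List (List Int))]
              = (closed ++ [cur ++ [movil]]) ++ [[]] by simp,
            show closed.length + 1 = (closed ++ [cur ++ [movil]]).length by simp,
            ih (closed ++ [cur ++ [movil]]) [] 1]
        simp
      · simp only [if_neg h]
        exact ih closed (cur ++ [movil]) _

theorem pvB_eq_groups (rest : List (List Int)) :
    ∀ (full : List (List Int)) (i prev : Nat) (c t : Int),
    rest = full.drop i → prev ≤ i → i ≤ full.length →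
    slicesLoop_Sub_dividir_moviles full (endsLoop_Sub_dividir_moviles rest i c t) prev
      = pvGroups rest (c - t) ((full.take i).drop prev) := by
  induction rest with
  | nil =>
      intro full i prev c t _ _ _
      simp [endsLoop_Sub_dividir_moviles, slicesLoop_Sub_dividir_moviles, pvGroups]
  | cons movil rest ih =>
      intro full i prev c t hdrop hprev hi
      have hi' : i < full.length := by
        by_contra h
        have h0 : full.drop i = [] := List.drop_eq_nil_of_le (by omega)
        rw [h0] at hdrop
        exact List.cons_ne_nil _ _ hdrop
      have h0 : full[i]? = some movil := by
        have h1 := congrArg (fun l => l[0]?) hdrop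
        simpa [List.getElem?_drop] using h1.symm
      have hslice : (full.take i).drop prev ++ [movil] = (full.take (i + 1)).drop prev := by
        rw [List.take_add_one, h0]
        rw [List.drop_append_of_le_length (by simp; omega)]
        rfl
      have hrest : rest = full.drop (i + 1) := by
        have h1 := congrArg List.tail hdrop
        rw [List.tail_drop] at h1
        simpa using h1
      simp only [endsLoop_Sub_dividir_moviles, pvGroups]
      by_cases hc : c + (PySem.List.count movil 0 : Int) - 1 = t
      · have hesp : c - t + (PySem.List.count movil 0 : Int) - 1 = 0 := by omega
        simp only [hc, hesp, if_true]
        simp only [slicesLoop_Sub_dividir_moviles]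
        rw [ih full (i + 1) (i + 1) t (t - 1) hrest (le_refl _) (by omega)]
        have hnil : (full.take (i + 1)).drop (i + 1) = [] :=
          List.drop_eq_nil_of_le (by simp)
        rw [hnil, show t - (t - 1) = 1 by omega]
        congr 1
        rw [PySem.List.slice_natCast, List.take_drop,
            show prev + (i + 1 - prev) = i + 1 by omega]
        exact hslice.symm
      · have hesp : ¬ (c - t + (PySem.List.count movil 0 : Int) - 1 = 0) := by omega
        simp only [if_neg hc, if_neg hesp]
        rw [ih full (i + 1) prev (c + (PySem.List.count movil 0 : Int) - 1) t
              hrest (by omega) (by omega), ← hslice]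
        congr 1
        omega

theorem Sub_dividir_moviles_spec : Claim_equal_Sub_dividir_moviles := by
  intro l _
  unfold Spec_Sub_dividir_moviles Sub_dividir_moviles Sub_dividir_moviles_alt
  rw [pvB_eq_groups l l 0 0 0 (-1) rfl (le_refl _) (by simp)]
  simpa using pvLoopA_eq_groups l [] [] 1
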